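-- pv_equiv track=rewrite | github.com/adjaunzemis/apl-golf-league-backend | usga_handicap.py | compute_handicap_strokes
-- ===== SOURCE A (Python) =====
-- def compute_handicap_strokes(handicap, index):
--     r"""
--     Computes handicap stokes a player recieves on a hole.
--
--     Parameters
--     ----------
--     handicap : int
--         hole handicap
--     index : int
--         player course handicap index
--
--     Returns
--     -------
--     strokes : int
--         handicap strokes received
--
--     References
--     ----------
--     USGA Rule 3.1
--
--     """
--     strokes = 0
--     if handicap > 0:
--         while index > 18:
--             strokes += 1
--             index -= 18
--         if handicap <= index:
--             strokes += 1
--     else: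
--         if (18 - handicap) < abs(index):
--             strokes -= 1
--     return strokes
-- ===== SOURCE B (Python) =====
-- def compute_handicap_strokes(handicap, index):
--     if handicap > 0:
--         c = max(0, (index - 1) // 18)
--         return c + (1 if handicap <= index - 18 * c else 0)
--     return -1 if (18 - handicap) < abs(index) else 0
-- ===== Notes on version B (the rewrite author's own statement) =====
-- stated objective: faster
-- what changed: Replaced the while-loop that repeatedly subtracts 18 from the index with a closed-form floor-division (quotient clamped to 0, remainder compared against the handicap).
import Mathlib
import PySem

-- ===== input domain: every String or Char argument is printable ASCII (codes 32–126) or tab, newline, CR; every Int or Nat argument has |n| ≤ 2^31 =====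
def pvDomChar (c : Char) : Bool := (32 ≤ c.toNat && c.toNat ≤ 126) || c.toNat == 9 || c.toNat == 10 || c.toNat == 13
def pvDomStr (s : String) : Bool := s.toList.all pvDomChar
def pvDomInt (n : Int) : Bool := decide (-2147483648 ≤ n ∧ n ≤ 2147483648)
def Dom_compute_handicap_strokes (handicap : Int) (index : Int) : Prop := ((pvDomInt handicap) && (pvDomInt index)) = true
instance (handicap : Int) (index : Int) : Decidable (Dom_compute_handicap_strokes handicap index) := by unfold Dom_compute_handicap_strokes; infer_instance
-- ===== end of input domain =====

-- B replaces A's repeated-subtraction while-loop by a closed-form floor division (objective: faster, O(1) vs O(index/18)).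

-- ===== PORT A =====
-- the 'while index > 18: strokes += 1; index -= 18' loop, returning (strokes, index)
def csLoop (strokes : Int) (index : Int) : Int × Int :=
  if 18 < index then csLoop (strokes + 1) (index - 18) else (strokes, index)
termination_by index.toNat
decreasing_by omega

def compute_handicap_strokes (handicap : Int) (index : Int) : Int :=
  if handicap > 0 then
    let p := csLoop 0 index
    if handicap ≤ p.2 then p.1 + 1 else p.1
  else
    if 18 - handicap < |index| then 0 - 1 else 0

-- ===== PORT B =====
def compute_handicap_strokes_alt (handicap : Int) (index : Int) : Int :=
  if handicap > 0 then
    let c := max 0 (PySem.Int.floordiv (index - 1) 18)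
    c + (if handicap ≤ index - 18 * c then 1 else 0)
  else
    if 18 - handicap < |index| then -1 else 0

-- ===== PRECONDITION & SPEC =====
def Spec_compute_handicap_strokes (handicap : Int) (index : Int) (out : Int) : Prop := out = compute_handicap_strokes_alt handicap index
instance (handicap : Int) (index : Int) (out : Int) : Decidable (Spec_compute_handicap_strokes handicap index out) := by unfold Spec_compute_handicap_strokes; infer_instance

-- ===== CLAIM (what is proved, stated in full; the proofs are below) =====
def Claim_equal_compute_handicap_strokes : Prop := ∀ (handicap : Int) (index : Int), Dom_compute_handicap_strokes handicap index → Spec_compute_handicap_strokes handicap index (compute_handicap_strokes handicap index)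

-- ===== LEMMAS AND PROOFS =====
-- the loop computes exactly the clamped quotient/remainder of the closed form
theorem csLoop_eq (strokes index : Int) :
    csLoop strokes index =
      (strokes + max 0 ((index - 1) / 18), index - 18 * max 0 ((index - 1) / 18)) := by
  fun_induction csLoop strokes index with
  | case1 s i h ih =>
      rw [ih, Prod.mk.injEq]
      omega
  | case2 s i h =>
      have h1 : max 0 ((i - 1) / 18) = 0 := by omega
      simp [h1]

-- ===== VERDICT (by name: the statement is the Claim_ definition above) =====
theorem compute_handicap_strokes_spec : Claim_equal_compute_handicap_strokes := by
  intro h i _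
  unfold Spec_compute_handicap_strokes compute_handicap_strokes compute_handicap_strokes_alt
  rw [PySem.Int.floordiv_eq_ediv_of_pos (by norm_num), csLoop_eq]
  split
  · simp only [zero_add]
    split <;> omega
  · norm_num
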